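-- pv_equiv track=rewrite | github.com/Vedang-P/chess-engine | engine/movegen.py | _build_leaper_attacks
-- ===== SOURCE A (Python) =====
-- def _in_bounds(file_idx: int, rank_idx: int) -> bool:
--     return 0 <= file_idx < 8 and 0 <= rank_idx < 8
--
-- def _sq(file_idx: int, rank_idx: int) -> int:
--     return rank_idx * 8 + file_idx
--
-- def _build_leaper_attacks(deltas: tuple[tuple[int, int], ...]) -> list[int]:
--     table = [0] * 64
--     for sq_idx in range(64):
--         file_idx = sq_idx % 8
--         rank_idx = sq_idx // 8
--         mask = 0
--         for df, dr in deltas: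
--             nf, nr = file_idx + df, rank_idx + dr
--             if _in_bounds(nf, nr):
--                 mask |= 1 << _sq(nf, nr)
--         table[sq_idx] = mask
--     return table
-- ===== SOURCE B (Python) =====
-- def _build_leaper_attacks(deltas):
--     # Delta-outer accumulation: for each (df, dr) the sources that stay on the
--     # board form a rectangle of files/ranks, computed once by clipping, so no
--     # per-square bounds test is needed.
--     table = [0] * 64
--     for df, dr in deltas:
--         f_lo, f_hi = max(0, -df), min(8, 8 - df)
--         r_lo, r_hi = max(0, -dr), min(8, 8 - dr)
--         for r in range(r_lo, r_hi):
--             base = r * 8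
--             shift = (r + dr) * 8 + df
--             for f in range(f_lo, f_hi):
--                 table[base + f] |= 1 << (shift + f)
--     return table
-- ===== Notes on version B (the rewrite author's own statement) =====
-- stated objective: faster
-- what changed: B iterates over the deltas in the outer loop and computes by arithmetic clipping the rectangle of source squares that stay on the board, OR-ing each shifted bit into that square's table entry, so A's per-square bounds test (64 per delta) disappears; a delta that leaves the board costs O(1).
import Mathlib
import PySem

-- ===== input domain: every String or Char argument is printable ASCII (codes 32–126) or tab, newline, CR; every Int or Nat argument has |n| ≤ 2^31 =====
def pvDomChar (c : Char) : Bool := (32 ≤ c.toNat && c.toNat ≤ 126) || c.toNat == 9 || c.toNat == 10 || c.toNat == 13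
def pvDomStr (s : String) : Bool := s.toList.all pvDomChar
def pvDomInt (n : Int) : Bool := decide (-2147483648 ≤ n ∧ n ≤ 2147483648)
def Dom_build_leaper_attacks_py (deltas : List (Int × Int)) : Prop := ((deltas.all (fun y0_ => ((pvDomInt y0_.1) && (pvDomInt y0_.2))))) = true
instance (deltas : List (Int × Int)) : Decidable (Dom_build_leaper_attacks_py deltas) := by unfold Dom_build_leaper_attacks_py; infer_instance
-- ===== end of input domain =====

-- B builds the same 64-entry leaper-attack table delta-first: for each (df, dr) it clips by
-- arithmetic the rectangle of source squares that stay on the board and ORs the shifted bits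
-- in, instead of A's per-square bounds test (objective: alternative decomposition).

-- ===== PORT A =====
def pvInBounds (file_idx rank_idx : Int) : Bool :=
  decide (0 ≤ file_idx ∧ file_idx < 8) && decide (0 ≤ rank_idx ∧ rank_idx < 8)

def pvSq (file_idx rank_idx : Int) : Int := rank_idx * 8 + file_idx

-- literal port of A: for every square, fold over the deltas accumulating the mask, then store it.
-- `1 << s` is `1 <<< s.toNat`; the shift amount pvSq nf nr lies in [0, 64) whenever pvInBounds holds.
def build_leaper_attacks_py (deltas : List (Int × Int)) : List Int :=
  (PySem.List.pyRange 0 64 1).foldl (fun table sq_idx =>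
    let file_idx := PySem.Int.mod sq_idx 8
    let rank_idx := PySem.Int.floordiv sq_idx 8
    let mask := deltas.foldl (fun mask d =>
      let nf := file_idx + d.1
      let nr := rank_idx + d.2
      if pvInBounds nf nr then PySem.Int.bor mask (1 <<< (pvSq nf nr).toNat) else mask) 0
    PySem.List.pySetD table sq_idx mask) (List.replicate 64 0)

-- ===== PORT B =====
-- literal port of Source B: deltas outer, clipped file/rank ranges, `table[i] |= x` as
-- pySetD/pyGetD (all indices base+f lie in [0, 64) by the clipping, and shift+f ≥ 0).
def build_leaper_attacks_py_alt (deltas : List (Int × Int)) : List Int :=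
  deltas.foldl (fun table d =>
    let df := d.1
    let dr := d.2
    let fLo := max 0 (-df)
    let fHi := min 8 (8 - df)
    let rLo := max 0 (-dr)
    let rHi := min 8 (8 - dr)
    (PySem.List.pyRange rLo rHi 1).foldl (fun table r =>
      let base := r * 8
      let shift := (r + dr) * 8 + df
      (PySem.List.pyRange fLo fHi 1).foldl (fun table f =>
        PySem.List.pySetD table (base + f)
          (PySem.Int.bor (PySem.List.pyGetD table (base + f) 0) (1 <<< (shift + f).toNat)))
        table) table) (List.replicate 64 0)

-- ===== PRECONDITION & SPEC =====
def Spec_build_leaper_attacks_py (deltas : List (Int × Int)) (out : List Int) : Prop := out = build_leaper_attacks_py_alt deltas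
instance (deltas : List (Int × Int)) (out : List Int) : Decidable (Spec_build_leaper_attacks_py deltas out) := by unfold Spec_build_leaper_attacks_py; infer_instance

-- ===== CLAIM (what is proved, stated in full; the proofs are below) =====
def Claim_equal_build_leaper_attacks_py : Prop := ∀ (deltas : List (Int × Int)), Dom_build_leaper_attacks_py deltas → Spec_build_leaper_attacks_py deltas (build_leaper_attacks_py deltas)

-- ===== LEMMAS AND PROOFS =====

/-- The mask A computes for the square sq, as a function of sq (proof-side name for A's inner fold). -/
def pvAMask (deltas : List (Int × Int)) (sq : Int) : Int :=
  deltas.foldl (fun mask d =>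
    if pvInBounds (PySem.Int.mod sq 8 + d.1) (PySem.Int.floordiv sq 8 + d.2)
    then PySem.Int.bor mask
      (1 <<< (pvSq (PySem.Int.mod sq 8 + d.1) (PySem.Int.floordiv sq 8 + d.2)).toNat)
    else mask) 0

/-- Proof-side name for B's inner (file) loop. -/
def pvInner (shift base fLo fHi : Int) (t : List Int) : List Int :=
  (PySem.List.pyRange fLo fHi 1).foldl (fun table f =>
    PySem.List.pySetD table (base + f)
      (PySem.Int.bor (PySem.List.pyGetD table (base + f) 0) (1 <<< (shift + f).toNat))) t

/-- Proof-side name for B's rank loop (one delta's whole update). -/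
def pvRowFold (df dr fLo fHi rLo rHi : Int) (t : List Int) : List Int :=
  (PySem.List.pyRange rLo rHi 1).foldl (fun table r =>
    pvInner ((r + dr) * 8 + df) (r * 8) fLo fHi table) t

/-- Proof-side name for B's per-delta step. -/
def pvBStep (table : List Int) (d : Int × Int) : List Int :=
  pvRowFold d.1 d.2 (max 0 (-d.1)) (min 8 (8 - d.1)) (max 0 (-d.2)) (min 8 (8 - d.2)) table

theorem pv_getD_set (t : List Int) (i k : Nat) (v : Int) (hk : k < t.length) :
    (t.set i v).getD k 0 = if i = k then v else t.getD k 0 := by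
  rw [List.getD_eq_getElem _ _ (by simpa using hk), List.getElem_set]
  split_ifs with h
  · rfl
  · rw [List.getD_eq_getElem _ _ hk]

/-- A's square loop: storing a table-independent value at each square of an increasing range. -/
theorem pv_setfold (F : Int → Int) :
    ∀ (n : Nat) (a : Int) (t : List Int), 0 ≤ a →
    ((PySem.List.pyRange a (a + (n : Int)) 1).foldl
        (fun t sq => PySem.List.pySetD t sq (F sq)) t).length = t.length ∧
    ∀ (k : Nat), k < t.length →
      ((PySem.List.pyRange a (a + (n : Int)) 1).foldl
        (fun t sq => PySem.List.pySetD t sq (F sq)) t).getD k 0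
        = if a ≤ (k : Int) ∧ (k : Int) < a + (n : Int) then F (k : Int) else t.getD k 0 := by
  intro n
  induction n with
  | zero =>
    intro a t ha
    simp only [Nat.cast_zero, add_zero]
    rw [PySem.List.pyRange_one_eq_nil le_rfl]
    refine ⟨rfl, fun k hk => ?_⟩
    rw [if_neg (by omega)]
    rfl
  | succ n ih =>
    intro a t ha
    have hb : a + ((n + 1 : Nat) : Int) = a + 1 + (n : Int) := by push_cast; ring
    rw [hb]
    have hcons : PySem.List.pyRange a (a + 1 + (n : Int)) 1
        = a :: PySem.List.pyRange (a + 1) (a + 1 + (n : Int)) 1 :=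
      PySem.List.pyRange_one_cons (by omega)
    rw [hcons]
    simp only [List.foldl_cons]
    rw [PySem.List.pySetD_of_nonneg t _ ha]
    obtain ⟨ihlen, ihget⟩ := ih (a + 1) (t.set a.toNat (F a)) (by omega)
    refine ⟨by rw [ihlen, List.length_set], ?_⟩
    intro k hk
    rw [ihget k (by rw [List.length_set]; exact hk)]
    rw [pv_getD_set t a.toNat k (F a) hk]
    by_cases hka : (k : Int) = a
    · rw [if_neg (by omega), if_pos (show a.toNat = k by omega),
        if_pos (show a ≤ (k : Int) ∧ (k : Int) < a + 1 + (n : Int) from ⟨by omega, by omega⟩)]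
      rw [hka]
    · rw [if_neg (show ¬(a.toNat = k) by omega)]
      have hiff : (a + 1 ≤ (k : Int) ∧ (k : Int) < a + 1 + (n : Int))
          ↔ (a ≤ (k : Int) ∧ (k : Int) < a + 1 + (n : Int)) := by omega
      simp only [hiff]

/-- B's inner loop: entries base+f for f in [fLo, fLo+n) get their shifted bit OR-ed in. -/
theorem pvInner_spec (shift base : Int) :
    ∀ (n : Nat) (fLo : Int) (t : List Int), 0 ≤ base + fLo →
      (base + fLo).toNat + n ≤ t.length →
    (pvInner shift base fLo (fLo + (n : Int)) t).length = t.length ∧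
    ∀ (k : Nat), k < t.length →
      (pvInner shift base fLo (fLo + (n : Int)) t).getD k 0
        = if fLo ≤ (k : Int) - base ∧ (k : Int) - base < fLo + (n : Int)
          then PySem.Int.bor (t.getD k 0) (1 <<< (shift + ((k : Int) - base)).toNat)
          else t.getD k 0 := by
  intro n
  induction n with
  | zero =>
    intro fLo t h0 hlen
    simp only [Nat.cast_zero, add_zero]
    unfold pvInner
    rw [PySem.List.pyRange_one_eq_nil le_rfl]
    refine ⟨rfl, fun k hk => ?_⟩
    rw [if_neg (by omega)]
    rfl
  | succ n ih =>
    intro fLo t h0 hlen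
    have hlt : (base + fLo).toNat < t.length := by omega
    have hb : fLo + ((n + 1 : Nat) : Int) = fLo + 1 + (n : Int) := by push_cast; ring
    rw [hb]
    have hcons : PySem.List.pyRange fLo (fLo + 1 + (n : Int)) 1
        = fLo :: PySem.List.pyRange (fLo + 1) (fLo + 1 + (n : Int)) 1 :=
      PySem.List.pyRange_one_cons (by omega)
    have hstep : pvInner shift base fLo (fLo + 1 + (n : Int)) t
        = pvInner shift base (fLo + 1) (fLo + 1 + (n : Int))
            (t.set (base + fLo).toNat
              (PySem.Int.bor (t[(base + fLo).toNat]'hlt) (1 <<< (shift + fLo).toNat))) := by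
      unfold pvInner
      rw [hcons]
      simp only [List.foldl_cons]
      rw [PySem.List.pyGetD_eq_getElem t 0 h0 (by omega), PySem.List.pySetD_of_nonneg t _ h0]
    have hlen' : (t.set (base + fLo).toNat
        (PySem.Int.bor (t[(base + fLo).toNat]'hlt) (1 <<< (shift + fLo).toNat))).length
        = t.length := List.length_set
    obtain ⟨ihlen, ihget⟩ := ih (fLo + 1)
      (t.set (base + fLo).toNat
        (PySem.Int.bor (t[(base + fLo).toNat]'hlt) (1 <<< (shift + fLo).toNat)))
      (by omega) (by rw [hlen']; omega)
    refine ⟨by rw [hstep, ihlen, hlen'], ?_⟩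
    intro k hk
    rw [hstep, ihget k (by rw [hlen']; exact hk)]
    have hset : (t.set (base + fLo).toNat
        (PySem.Int.bor (t[(base + fLo).toNat]'hlt) (1 <<< (shift + fLo).toNat))).getD k 0
        = if (base + fLo).toNat = k
          then PySem.Int.bor (t.getD k 0) (1 <<< (shift + fLo).toNat)
          else t.getD k 0 := by
      rw [pv_getD_set t _ k _ hk]
      split_ifs with hik
      · subst hik
        rw [List.getD_eq_getElem _ _ hlt]
      · rfl
    rw [hset]
    by_cases hke : (k : Int) - base = fLo
    · rw [if_neg (show ¬(fLo + 1 ≤ (k : Int) - base ∧ (k : Int) - base < fLo + 1 + (n : Int)) by omega),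
        if_pos (show (base + fLo).toNat = k by omega),
        if_pos (show fLo ≤ (k : Int) - base ∧ (k : Int) - base < fLo + 1 + (n : Int) from ⟨by omega, by omega⟩)]
      rw [hke]
    · rw [if_neg (show ¬((base + fLo).toNat = k) by omega)]
      have hiff : (fLo + 1 ≤ (k : Int) - base ∧ (k : Int) - base < fLo + 1 + (n : Int))
          ↔ (fLo ≤ (k : Int) - base ∧ (k : Int) - base < fLo + 1 + (n : Int)) := by omega
      simp only [hiff]

/-- B's rank loop for one delta: entry k is touched iff its rank is in [rLo, rLo+n) and its file in [fLo, fHi). -/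
theorem pvRow_spec (df dr fLo fHi : Int) (h0f : 0 ≤ fLo) (h8f : fHi ≤ 8) :
    ∀ (n : Nat) (rLo : Int) (t : List Int), 0 ≤ rLo → rLo + (n : Int) ≤ 8 → t.length = 64 →
    (pvRowFold df dr fLo fHi rLo (rLo + (n : Int)) t).length = 64 ∧
    ∀ (k : Nat), k < 64 →
      (pvRowFold df dr fLo fHi rLo (rLo + (n : Int)) t).getD k 0
        = if rLo ≤ ((k / 8 : Nat) : Int) ∧ ((k / 8 : Nat) : Int) < rLo + (n : Int)
              ∧ fLo ≤ ((k % 8 : Nat) : Int) ∧ ((k % 8 : Nat) : Int) < fHi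
          then PySem.Int.bor (t.getD k 0)
            (1 <<< ((((k / 8 : Nat) : Int) + dr) * 8 + df + ((k % 8 : Nat) : Int)).toNat)
          else t.getD k 0 := by
  intro n
  induction n with
  | zero =>
    intro rLo t h0 h8 ht
    simp only [Nat.cast_zero, add_zero]
    unfold pvRowFold
    rw [PySem.List.pyRange_one_eq_nil le_rfl]
    refine ⟨ht, fun k hk => ?_⟩
    rw [if_neg (by omega)]
    rfl
  | succ n ih =>
    intro rLo t h0 h8 ht
    have hb : rLo + ((n + 1 : Nat) : Int) = rLo + 1 + (n : Int) := by push_cast; ring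
    rw [hb]
    have hcons : PySem.List.pyRange rLo (rLo + 1 + (n : Int)) 1
        = rLo :: PySem.List.pyRange (rLo + 1) (rLo + 1 + (n : Int)) 1 :=
      PySem.List.pyRange_one_cons (by omega)
    have hstep : pvRowFold df dr fLo fHi rLo (rLo + 1 + (n : Int)) t
        = pvRowFold df dr fLo fHi (rLo + 1) (rLo + 1 + (n : Int))
            (pvInner ((rLo + dr) * 8 + df) (rLo * 8) fLo fHi t) := by
      unfold pvRowFold
      rw [hcons]
      simp only [List.foldl_cons]
    have hinner : (pvInner ((rLo + dr) * 8 + df) (rLo * 8) fLo fHi t).length = t.length ∧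
        ∀ (k : Nat), k < t.length →
          (pvInner ((rLo + dr) * 8 + df) (rLo * 8) fLo fHi t).getD k 0
            = if fLo ≤ (k : Int) - rLo * 8 ∧ (k : Int) - rLo * 8 < fHi
              then PySem.Int.bor (t.getD k 0)
                (1 <<< ((rLo + dr) * 8 + df + ((k : Int) - rLo * 8)).toNat)
              else t.getD k 0 := by
      by_cases hf : fLo ≤ fHi
      · have hfh : fHi = fLo + (((fHi - fLo).toNat : Nat) : Int) := by omega
        rw [hfh]
        exact pvInner_spec ((rLo + dr) * 8 + df) (rLo * 8) (fHi - fLo).toNat fLo t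
          (by omega) (by omega)
      · have hnil : PySem.List.pyRange fLo fHi 1 = [] := PySem.List.pyRange_one_eq_nil (by omega)
        unfold pvInner
        rw [hnil]
        refine ⟨rfl, fun k hk => ?_⟩
        rw [if_neg (by omega)]
        rfl
    obtain ⟨hql, hqg⟩ := hinner
    obtain ⟨ihlen, ihget⟩ := ih (rLo + 1) (pvInner ((rLo + dr) * 8 + df) (rLo * 8) fLo fHi t)
      (by omega) (by omega) (hql.trans ht)
    refine ⟨by rw [hstep]; exact ihlen, ?_⟩
    intro k hk
    rw [hstep, ihget k hk, hqg k (by omega)]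
    by_cases hr : ((k / 8 : Nat) : Int) = rLo
    · rw [if_neg (show ¬(rLo + 1 ≤ ((k / 8 : Nat) : Int) ∧ ((k / 8 : Nat) : Int) < rLo + 1 + (n : Int)
          ∧ fLo ≤ ((k % 8 : Nat) : Int) ∧ ((k % 8 : Nat) : Int) < fHi) by omega)]
      have hf' : (k : Int) - rLo * 8 = ((k % 8 : Nat) : Int) := by omega
      rw [hf']
      by_cases hfc : fLo ≤ ((k % 8 : Nat) : Int) ∧ ((k % 8 : Nat) : Int) < fHi
      · rw [if_pos hfc, if_pos (show rLo ≤ ((k / 8 : Nat) : Int) ∧ ((k / 8 : Nat) : Int) < rLo + 1 + (n : Int)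
            ∧ fLo ≤ ((k % 8 : Nat) : Int) ∧ ((k % 8 : Nat) : Int) < fHi from ⟨by omega, by omega, hfc.1, hfc.2⟩)]
        rw [← hr]
      · rw [if_neg hfc, if_neg (fun hcon => hfc ⟨hcon.2.2.1, hcon.2.2.2⟩)]
    · rw [if_neg (show ¬(fLo ≤ (k : Int) - rLo * 8 ∧ (k : Int) - rLo * 8 < fHi) by omega)]
      have hiff : (rLo + 1 ≤ ((k / 8 : Nat) : Int) ∧ ((k / 8 : Nat) : Int) < rLo + 1 + (n : Int)
            ∧ fLo ≤ ((k % 8 : Nat) : Int) ∧ ((k % 8 : Nat) : Int) < fHi)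
          ↔ (rLo ≤ ((k / 8 : Nat) : Int) ∧ ((k / 8 : Nat) : Int) < rLo + 1 + (n : Int)
            ∧ fLo ≤ ((k % 8 : Nat) : Int) ∧ ((k % 8 : Nat) : Int) < fHi) := by
        constructor <;> rintro ⟨h1, h2, h3, h4⟩ <;> exact ⟨by omega, h2, h3, h4⟩
      simp only [hiff]

/-- B's whole fold, entry by entry: each table entry folds its own per-delta OR chain. -/
theorem pvB_entry (deltas : List (Int × Int)) :
    ∀ (t : List Int), t.length = 64 →
    (deltas.foldl pvBStep t).length = 64 ∧
    ∀ (k : Nat), k < 64 →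
      (deltas.foldl pvBStep t).getD k 0
        = deltas.foldl (fun mask d =>
            if pvInBounds (((k % 8 : Nat) : Int) + d.1) (((k / 8 : Nat) : Int) + d.2)
            then PySem.Int.bor mask
              (1 <<< (pvSq (((k % 8 : Nat) : Int) + d.1) (((k / 8 : Nat) : Int) + d.2)).toNat)
            else mask) (t.getD k 0) := by
  induction deltas with
  | nil => exact fun t ht => ⟨ht, fun k _ => rfl⟩
  | cons d ds ih =>
    intro t ht
    have hstep : (pvBStep t d).length = 64 ∧
        ∀ (k : Nat), k < 64 →
          (pvBStep t d).getD k 0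
            = if pvInBounds (((k % 8 : Nat) : Int) + d.1) (((k / 8 : Nat) : Int) + d.2)
              then PySem.Int.bor (t.getD k 0)
                (1 <<< (pvSq (((k % 8 : Nat) : Int) + d.1) (((k / 8 : Nat) : Int) + d.2)).toNat)
              else t.getD k 0 := by
      by_cases hrr : max 0 (-d.2) ≤ min 8 (8 - d.2)
      · have hrh : min 8 (8 - d.2)
            = max 0 (-d.2) + ((((min 8 (8 - d.2) - max 0 (-d.2)).toNat : Nat)) : Int) := by omega
        have h := pvRow_spec d.1 d.2 (max 0 (-d.1)) (min 8 (8 - d.1)) (by omega) (by omega)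
          (min 8 (8 - d.2) - max 0 (-d.2)).toNat (max 0 (-d.2)) t (by omega) (by omega) ht
        constructor
        · show (pvBStep t d).length = 64
          unfold pvBStep
          rw [hrh]
          exact h.1
        · intro k hk
          unfold pvBStep
          rw [hrh, h.2 k hk]
          by_cases hin : (0 ≤ ((k % 8 : Nat) : Int) + d.1 ∧ ((k % 8 : Nat) : Int) + d.1 < 8)
              ∧ (0 ≤ ((k / 8 : Nat) : Int) + d.2 ∧ ((k / 8 : Nat) : Int) + d.2 < 8)
          · rw [if_pos (show max 0 (-d.2) ≤ ((k / 8 : Nat) : Int)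
                ∧ ((k / 8 : Nat) : Int) < max 0 (-d.2) + ((((min 8 (8 - d.2) - max 0 (-d.2)).toNat : Nat)) : Int)
                ∧ max 0 (-d.1) ≤ ((k % 8 : Nat) : Int) ∧ ((k % 8 : Nat) : Int) < min 8 (8 - d.1)
                from ⟨by omega, by omega, by omega, by omega⟩),
              if_pos (show pvInBounds (((k % 8 : Nat) : Int) + d.1) (((k / 8 : Nat) : Int) + d.2) = true by
                simp only [pvInBounds, Bool.and_eq_true, decide_eq_true_eq]; exact hin)]
            rw [show ((((k / 8 : Nat) : Int) + d.2) * 8 + d.1 + ((k % 8 : Nat) : Int))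
                = pvSq (((k % 8 : Nat) : Int) + d.1) (((k / 8 : Nat) : Int) + d.2) from by
              unfold pvSq; ring]
          · rw [if_neg (by omega),
              if_neg (show ¬(pvInBounds (((k % 8 : Nat) : Int) + d.1) (((k / 8 : Nat) : Int) + d.2) = true) by
                simp only [pvInBounds, Bool.and_eq_true, decide_eq_true_eq]; exact hin)]
      · have hnil : PySem.List.pyRange (max 0 (-d.2)) (min 8 (8 - d.2)) 1 = [] :=
          PySem.List.pyRange_one_eq_nil (by omega)
        unfold pvBStep pvRowFold
        rw [hnil]
        simp only [List.foldl_nil]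
        refine ⟨ht, fun k hk => ?_⟩
        rw [if_neg (show ¬(pvInBounds (((k % 8 : Nat) : Int) + d.1) (((k / 8 : Nat) : Int) + d.2) = true) by
          simp only [pvInBounds, Bool.and_eq_true, decide_eq_true_eq]; omega)]
    obtain ⟨hslen, hsget⟩ := hstep
    simp only [List.foldl_cons]
    obtain ⟨ihlen, ihget⟩ := ih (pvBStep t d) hslen
    refine ⟨ihlen, fun k hk => ?_⟩
    exact (ihget k hk).trans (by rw [hsget k hk])

-- ===== VERDICT (by name: the statement is the Claim_ definition above) =====
theorem build_leaper_attacks_py_spec : Claim_equal_build_leaper_attacks_py := by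
  intro deltas _hdom
  show build_leaper_attacks_py deltas = build_leaper_attacks_py_alt deltas
  have hArfl : build_leaper_attacks_py deltas
      = (PySem.List.pyRange 0 64 1).foldl
          (fun t sq => PySem.List.pySetD t sq (pvAMask deltas sq)) (List.replicate 64 0) := rfl
  have hBrfl : build_leaper_attacks_py_alt deltas
      = deltas.foldl pvBStep (List.replicate 64 0) := rfl
  have hA := pv_setfold (pvAMask deltas) 64 0 (List.replicate 64 (0 : Int)) le_rfl
  have hb64 : (0 : Int) + ((64 : Nat) : Int) = (64 : Int) := by norm_num
  rw [hb64] at hA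
  have hB := pvB_entry deltas (List.replicate 64 (0 : Int)) (by simp)
  have hAlen : (build_leaper_attacks_py deltas).length = 64 := by
    rw [hArfl, hA.1]; simp
  have hBlen : (build_leaper_attacks_py_alt deltas).length = 64 := by
    rw [hBrfl, hB.1]
  apply List.ext_getElem (hAlen.trans hBlen.symm)
  intro k hk1 hk2
  have hk64 : k < 64 := hAlen ▸ hk1
  have hrep : (List.replicate 64 (0 : Int)).getD k 0 = 0 := by
    rw [List.getD_eq_getElem _ _ (by simpa using hk64)]
    simp only [List.getElem_replicate]
  have hAk : (build_leaper_attacks_py deltas).getD k 0 = pvAMask deltas (k : Int) := by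
    rw [hArfl, hA.2 k (by simpa using hk64), if_pos ⟨by omega, by omega⟩]
  have hmod : PySem.Int.mod ((k : Nat) : Int) 8 = ((k % 8 : Nat) : Int) := by
    rw [PySem.Int.mod_eq_emod_of_pos (by norm_num)]; omega
  have hdiv : PySem.Int.floordiv ((k : Nat) : Int) 8 = ((k / 8 : Nat) : Int) := by
    rw [PySem.Int.floordiv_eq_ediv_of_pos (by norm_num)]; omega
  have hBk : (build_leaper_attacks_py_alt deltas).getD k 0 = pvAMask deltas (k : Int) := by
    rw [hBrfl, hB.2 k hk64, hrep]
    unfold pvAMask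
    rw [hmod, hdiv]
  rw [← List.getD_eq_getElem (build_leaper_attacks_py deltas) 0 hk1,
    ← List.getD_eq_getElem (build_leaper_attacks_py_alt deltas) 0 hk2, hAk, hBk]
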